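-- pv_equiv track=rewrite | github.com/saridha11/python | common divisior pro.py | isCommonBase
-- ===== SOURCE A (Python) =====
-- def isCommonBase(base, s1, s2):
--     for j in range(len(s1)):
--         if (base[j % len(base)] != s1[j]):
--             return False
--     for j in range(len(s2)):
--         if (base[j % len( base)] != s2[j]):
--             return False
--
--     return True
-- ===== SOURCE B (Python) =====
-- def isCommonBase(base, s1, s2):
--     def tiles(s):
--         if not s:
--             return True
--         reps = (len(s) + len(base) - 1) // len(base)
--         return (base * reps)[:len(s)] == s
--     return tiles(s1) and tiles(s2)
-- ===== Notes on version B (the rewrite author's own statement) =====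
-- stated objective: idiomatic
-- what changed: Replaced the two per-character modular-index loops with a helper that repeats base ceil(len(s)/len(base)) times and compares the sliced repetition to s, conjoined for s1 and s2.
import Mathlib
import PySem

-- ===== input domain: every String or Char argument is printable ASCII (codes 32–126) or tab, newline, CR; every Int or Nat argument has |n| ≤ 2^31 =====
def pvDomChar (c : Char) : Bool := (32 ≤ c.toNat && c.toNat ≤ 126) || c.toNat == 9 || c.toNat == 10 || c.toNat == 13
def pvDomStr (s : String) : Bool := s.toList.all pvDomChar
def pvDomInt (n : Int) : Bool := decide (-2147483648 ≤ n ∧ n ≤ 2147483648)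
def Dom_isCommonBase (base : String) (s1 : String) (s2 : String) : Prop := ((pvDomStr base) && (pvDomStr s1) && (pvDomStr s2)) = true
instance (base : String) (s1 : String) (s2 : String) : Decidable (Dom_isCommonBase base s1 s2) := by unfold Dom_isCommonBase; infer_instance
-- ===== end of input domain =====

-- B replaces A's two per-character modular-index loops by repeating base and comparing a
-- slice of the repetition to each string (objective: idiomatic; same cost).

-- ===== PORT A =====
-- one Python `for j in range(len(s))` loop with early `return False`;
-- base[j % len(base)]: the index is always in range when base ≠ [] (Pre_ excludes base = []
-- with a nonempty string, where Python raises ZeroDivisionError), so getD's default is never used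
def loopA (b : List Char) : List Char → Nat → Bool
  | [], _ => true
  | c :: rest, j => if b.getD (j % b.length) 'A' ≠ c then false else loopA b rest (j + 1)

def isCommonBase (base : String) (s1 : String) (s2 : String) : Bool :=
  if !(loopA base.toList s1.toList 0) then false
  else if !(loopA base.toList s2.toList 0) then false
  else true

-- ===== PORT B =====
-- Source B's tiles helper: `(base * reps)[:len(s)] == s` with reps = (len(s)+len(base)-1)//len(base);
-- the `//` is on nonnegative ints, where Python's floordiv equals Nat division
def tiles (b : List Char) (s : List Char) : Bool :=
  if s.isEmpty then true
  else
    let reps := (s.length + b.length - 1) / b.length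
    ((List.replicate reps b).flatten.take s.length) == s

def isCommonBase_alt (base : String) (s1 : String) (s2 : String) : Bool :=
  tiles base.toList s1.toList && tiles base.toList s2.toList

-- ===== PRECONDITION & SPEC =====
-- Pre_ excludes exactly the inputs where Python A raises ZeroDivisionError
-- (empty base with a nonempty s1 or s2); B raises there too.
def Pre_isCommonBase (base : String) (s1 : String) (s2 : String) : Prop :=
  base.toList ≠ [] ∨ (s1.toList = [] ∧ s2.toList = [])
instance (base : String) (s1 : String) (s2 : String) : Decidable (Pre_isCommonBase base s1 s2) := by
  unfold Pre_isCommonBase; infer_instance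

def pvWitness_isCommonBase : String × String × String := ("ab", "abab", "aba")

def Spec_isCommonBase (base : String) (s1 : String) (s2 : String) (out : Bool) : Prop := out = isCommonBase_alt base s1 s2
instance (base : String) (s1 : String) (s2 : String) (out : Bool) : Decidable (Spec_isCommonBase base s1 s2 out) := by unfold Spec_isCommonBase; infer_instance

-- ===== CLAIM (what is proved, stated in full; the proofs are below) =====
def Claim_equal_isCommonBase : Prop := ∀ (base : String) (s1 : String) (s2 : String), Dom_isCommonBase base s1 s2 → Pre_isCommonBase base s1 s2 → Spec_isCommonBase base s1 s2 (isCommonBase base s1 s2)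

-- ===== LEMMAS AND PROOFS =====

theorem loopA_iff (b : List Char) (s : List Char) (j : Nat) :
    loopA b s j = true ↔ ∀ i (h : i < s.length), s[i] = b.getD ((j + i) % b.length) 'A' := by
  induction s generalizing j with
  | nil => simp [loopA]
  | cons c rest ih =>
    by_cases h : b.getD (j % b.length) 'A' ≠ c
    · simp only [loopA, if_pos h]
      constructor
      · intro hf; exact absurd hf (by simp)
      · intro hr
        exact absurd ((hr 0 (by simp)).symm) (by simpa using h)
    · rw [not_not] at h
      simp only [loopA, if_neg (show ¬(b.getD (j % b.length) 'A' ≠ c) from fun hc => hc h)]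
      rw [ih]
      constructor
      · intro hr i hi
        cases i with
        | zero => simpa using h.symm
        | succ n =>
          have := hr n (by simpa using Nat.lt_of_succ_lt_succ hi)
          simpa [Nat.add_assoc, Nat.add_comm 1 n] using this
      · intro hr i hi
        have := hr (i + 1) (by simpa using Nat.succ_lt_succ hi)
        simpa [Nat.add_assoc, Nat.add_comm 1 i] using this

theorem len_flat (b : List Char) (n : Nat) :
    ((List.replicate n b).flatten).length = n * b.length := by
  induction n with
  | zero => simp
  | succ n ih => simp [List.replicate_succ, ih, Nat.succ_mul]; omega

theorem getD_flat (b : List Char) (n k : Nat) (hk : k < n * b.length) :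
    ((List.replicate n b).flatten).getD k 'A' = b.getD (k % b.length) 'A' := by
  induction n generalizing k with
  | zero => simp at hk
  | succ n ih =>
    have hL : 0 < b.length := by
      rcases Nat.eq_zero_or_pos b.length with h | h
      · rw [h, Nat.mul_zero] at hk; omega
      · exact h
    rw [List.replicate_succ, List.flatten_cons]
    by_cases h : k < b.length
    · rw [List.getD_append _ _ _ _ h, Nat.mod_eq_of_lt h]
    · rw [Nat.not_lt] at h
      rw [List.getD_append_right _ _ _ _ h]
      rw [ih (k - b.length) (by simp [Nat.succ_mul] at hk; omega)]
      rw [Nat.mod_eq_sub_mod h]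

theorem tiles_iff (b : List Char) (s : List Char) (hb : b ≠ []) :
    tiles b s = true ↔ ∀ i (h : i < s.length), s[i] = b.getD (i % b.length) 'A' := by
  by_cases hs : s = []
  · simp [tiles, hs]
  · have hL : 0 < b.length := List.length_pos_iff.mpr hb
    have hmle : s.length ≤ ((s.length + b.length - 1) / b.length) * b.length := by
      have hdm := Nat.div_add_mod (s.length + b.length - 1) b.length
      have hmod := Nat.mod_lt (s.length + b.length - 1) hL
      rw [Nat.mul_comm]
      omega
    have hlen : ((List.replicate ((s.length + b.length - 1) / b.length) b).flatten).length
        = ((s.length + b.length - 1) / b.length) * b.length := len_flat b _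
    simp only [tiles, List.isEmpty_iff, if_neg hs, beq_iff_eq]
    constructor
    · intro h i hi
      have h1 : i < ((List.replicate ((s.length + b.length - 1) / b.length) b).flatten.take s.length).length := by
        simp [hlen]; omega
      have h2 : ((List.replicate ((s.length + b.length - 1) / b.length) b).flatten.take s.length)[i] = s[i] :=
        List.getElem_of_eq h h1
      rw [← h2, List.getElem_take]
      rw [← getD_flat b ((s.length + b.length - 1) / b.length) i (by omega)]
      exact (List.getD_eq_getElem _ _ (by omega)).symm
    · intro h
      apply List.ext_getElem
      · simp [hlen]; omega
      · intro i h1 h2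
        rw [List.getElem_take]
        rw [h i h2, ← getD_flat b ((s.length + b.length - 1) / b.length) i (by omega)]
        exact (List.getD_eq_getElem _ _ (by omega)).symm

theorem loopA_eq_tiles (b : List Char) (s : List Char) (hb : b ≠ []) :
    loopA b s 0 = tiles b s := by
  rw [Bool.eq_iff_iff, loopA_iff, tiles_iff b s hb]
  simp

-- ===== VERDICT (by name: the statement is the Claim_ definition above) =====
theorem isCommonBase_spec : Claim_equal_isCommonBase := by
  intro base s1 s2 _ hpre
  unfold Spec_isCommonBase isCommonBase isCommonBase_alt
  by_cases hb : base.toList = []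
  · rcases hpre with h | ⟨h1, h2⟩
    · exact absurd hb h
    · simp [h1, h2, loopA, tiles]
  · rw [loopA_eq_tiles _ _ hb, loopA_eq_tiles _ _ hb]
    cases tiles base.toList s1.toList <;> cases tiles base.toList s2.toList <;> simp
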